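-- pv_equiv track=rewrite | github.com/alexanderpaolini/competitive_programming_solutions | code-quest-2024/11larger/solution.py | custom_sorting_algo
-- ===== SOURCE A (Python) =====
-- def custom_sorting_algo(s1, s2):
--     if s1 == s2:
--         return 0
--     s1 = list(s1)
--     s2 = list(s2)
--     for i in range(min(len(s1), len(s2))):
--         if s1[i] == s2[i]:
--             continue
--         elif int(s1[i]) > int(s2[i]):
--             return 1
--         else:
--             return -1
--     return 0
-- ===== SOURCE B (Python) =====
-- def custom_sorting_algo(s1, s2):
--     n = min(len(s1), len(s2))
--     p1, p2 = s1[:n], s2[:n]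
--     if p1 == p2:
--         return 0
--     return 1 if p1 > p2 else -1
-- ===== Notes on version B (the rewrite author's own statement) =====
-- stated objective: simpler
-- what changed: B replaces the explicit per-character loop with int() conversions by slicing both strings to the common length and using lexicographic string comparison, which coincides with digit ordering on digit strings.
-- crash fix: A raises ValueError when the first differing character within the common prefix of the two strings is not a decimal digit on either side; B returns the lexicographic comparison result (-1 or 1) there. — e.g. on custom_sorting_algo("x", "y"): A raises ValueError, B returns -1
import Mathlib
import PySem

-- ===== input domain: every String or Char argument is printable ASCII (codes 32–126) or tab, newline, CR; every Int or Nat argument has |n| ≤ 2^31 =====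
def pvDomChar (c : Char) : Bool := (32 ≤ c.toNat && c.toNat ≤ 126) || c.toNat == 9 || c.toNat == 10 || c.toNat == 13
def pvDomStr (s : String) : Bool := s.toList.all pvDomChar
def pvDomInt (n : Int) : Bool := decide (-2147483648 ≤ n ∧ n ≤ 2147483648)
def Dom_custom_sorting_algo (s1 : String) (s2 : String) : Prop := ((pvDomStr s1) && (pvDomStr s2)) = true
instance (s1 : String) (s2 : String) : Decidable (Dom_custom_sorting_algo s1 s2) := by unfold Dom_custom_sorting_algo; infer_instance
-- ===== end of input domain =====

-- B replaces A's per-character loop with int() conversions by comparing the equal-length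
-- prefixes lexicographically (objective: simpler); equal on digit mismatches (Pre_ below).

-- ===== PORT A =====
-- the for-loop over range(min(len,len)); int(c) is PySem.Int.ofStr? — Pre_ excludes the
-- inputs where it is none (ValueError), so the `.getD 0` default is never relied upon.
def pvLoopA : List Char → List Char → Int
  | a :: as, b :: bs =>
    if a = b then pvLoopA as bs
    else if (PySem.Int.ofStr? (String.mk [a])).getD 0 > (PySem.Int.ofStr? (String.mk [b])).getD 0
      then 1 else -1
  | _, _ => 0

def custom_sorting_algo (s1 : String) (s2 : String) : Int :=
  if s1 = s2 then 0 else pvLoopA s1.toList s2.toList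

-- ===== PORT B =====
-- Python's lexicographic `>` on strings of equal length
def pvLexGT : List Char → List Char → Bool
  | a :: as, b :: bs => if a = b then pvLexGT as bs else decide (b < a)
  | _ :: _, [] => true
  | [], _ => false

def custom_sorting_algo_alt (s1 : String) (s2 : String) : Int :=
  let n := min s1.toList.length s2.toList.length
  let p1 := s1.toList.take n
  let p2 := s2.toList.take n
  if p1 = p2 then 0 else if pvLexGT p1 p2 then 1 else -1

-- ===== PRECONDITION & SPEC =====
-- Pre_ excludes exactly the inputs where A raises ValueError: when the first differing
-- position within the common length holds a non-digit character on either side.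
def Pre_custom_sorting_algo (s1 : String) (s2 : String) : Prop :=
  ∀ i : Nat, (h : i < min s1.toList.length s2.toList.length) →
    s1.toList.take i = s2.toList.take i →
    (s1.toList.get ⟨i, lt_of_lt_of_le h (min_le_left _ _)⟩) ≠ (s2.toList.get ⟨i, lt_of_lt_of_le h (min_le_right _ _)⟩) →
    ((47 < (s1.toList.get ⟨i, lt_of_lt_of_le h (min_le_left _ _)⟩).toNat ∧ (s1.toList.get ⟨i, lt_of_lt_of_le h (min_le_left _ _)⟩).toNat < 58) ∧
     (47 < (s2.toList.get ⟨i, lt_of_lt_of_le h (min_le_right _ _)⟩).toNat ∧ (s2.toList.get ⟨i, lt_of_lt_of_le h (min_le_right _ _)⟩).toNat < 58))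
instance (s1 : String) (s2 : String) : Decidable (Pre_custom_sorting_algo s1 s2) := by
  unfold Pre_custom_sorting_algo; infer_instance
def pvWitness_custom_sorting_algo : String × String := ("a", "a")

-- A raises ValueError when the first differing character within the common length is not a
-- decimal digit on either side; B returns the lexicographic comparison result there.
-- (that this region lies outside Pre_ and B's value at the witness are proved in custom_sorting_algo_raises)
def Raises_custom_sorting_algo (s1 : String) (s2 : String) : Prop :=
  ∃ i : Nat, ∃ h : i < min s1.toList.length s2.toList.length,
    s1.toList.take i = s2.toList.take i ∧
    (s1.toList.get ⟨i, lt_of_lt_of_le h (min_le_left _ _)⟩) ≠ (s2.toList.get ⟨i, lt_of_lt_of_le h (min_le_right _ _)⟩) ∧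
    ¬((47 < (s1.toList.get ⟨i, lt_of_lt_of_le h (min_le_left _ _)⟩).toNat ∧ (s1.toList.get ⟨i, lt_of_lt_of_le h (min_le_left _ _)⟩).toNat < 58) ∧
      (47 < (s2.toList.get ⟨i, lt_of_lt_of_le h (min_le_right _ _)⟩).toNat ∧ (s2.toList.get ⟨i, lt_of_lt_of_le h (min_le_right _ _)⟩).toNat < 58))
instance (s1 : String) (s2 : String) : Decidable (Raises_custom_sorting_algo s1 s2) := by
  unfold Raises_custom_sorting_algo; infer_instance
def pvRaiseWitness_custom_sorting_algo : String × String := ("x", "y")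
def pvRaiseWitnessOut_custom_sorting_algo : Int := -1

def Spec_custom_sorting_algo (s1 : String) (s2 : String) (out : Int) : Prop := out = custom_sorting_algo_alt s1 s2
instance (s1 : String) (s2 : String) (out : Int) : Decidable (Spec_custom_sorting_algo s1 s2 out) := by unfold Spec_custom_sorting_algo; infer_instance

-- ===== CLAIM (what is proved, stated in full; the proofs are below) =====
def Claim_equal_custom_sorting_algo : Prop := ∀ (s1 : String) (s2 : String), Dom_custom_sorting_algo s1 s2 → Pre_custom_sorting_algo s1 s2 → Spec_custom_sorting_algo s1 s2 (custom_sorting_algo s1 s2)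
def Claim_raises_custom_sorting_algo : Prop := (∀ (s1 : String) (s2 : String), Dom_custom_sorting_algo s1 s2 → Raises_custom_sorting_algo s1 s2 → ¬ Pre_custom_sorting_algo s1 s2) ∧ (Dom_custom_sorting_algo (pvRaiseWitness_custom_sorting_algo.1) (pvRaiseWitness_custom_sorting_algo.2) ∧ Raises_custom_sorting_algo (pvRaiseWitness_custom_sorting_algo.1) (pvRaiseWitness_custom_sorting_algo.2) ∧ custom_sorting_algo_alt (pvRaiseWitness_custom_sorting_algo.1) (pvRaiseWitness_custom_sorting_algo.2) = pvRaiseWitnessOut_custom_sorting_algo)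

-- ===== LEMMAS AND PROOFS =====

theorem pv_digit_mem (c : Char) (h : c.isDigit) :
    c ∈ ['0','1','2','3','4','5','6','7','8','9'] := by
  simp only [Char.isDigit, Bool.and_eq_true, decide_eq_true_eq] at h
  obtain ⟨h1, h2⟩ := h
  have h1' : 48 ≤ c.toNat := h1
  have h2' : c.toNat ≤ 57 := h2
  simp only [List.mem_cons, List.not_mem_nil, or_false]
  interval_cases h : c.toNat <;> first
    | exact .inl (Char.ext (UInt32.toNat_inj.mp h))
    | exact .inr (.inl (Char.ext (UInt32.toNat_inj.mp h)))
    | exact .inr (.inr (.inl (Char.ext (UInt32.toNat_inj.mp h))))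
    | exact .inr (.inr (.inr (.inl (Char.ext (UInt32.toNat_inj.mp h)))))
    | exact .inr (.inr (.inr (.inr (.inl (Char.ext (UInt32.toNat_inj.mp h))))))
    | exact .inr (.inr (.inr (.inr (.inr (.inl (Char.ext (UInt32.toNat_inj.mp h)))))))
    | exact .inr (.inr (.inr (.inr (.inr (.inr (.inl (Char.ext (UInt32.toNat_inj.mp h))))))))
    | exact .inr (.inr (.inr (.inr (.inr (.inr (.inr (.inl (Char.ext (UInt32.toNat_inj.mp h)))))))))
    | exact .inr (.inr (.inr (.inr (.inr (.inr (.inr (.inr (.inl (Char.ext (UInt32.toNat_inj.mp h))))))))))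
    | exact .inr (.inr (.inr (.inr (.inr (.inr (.inr (.inr (.inr (Char.ext (UInt32.toNat_inj.mp h))))))))))

theorem pv_digit_cmp (a b : Char) (ha : a.isDigit) (hb : b.isDigit) :
    ((PySem.Int.ofStr? (String.mk [a])).getD 0 > (PySem.Int.ofStr? (String.mk [b])).getD 0)
      ↔ b < a := by
  have ha' := pv_digit_mem a ha
  have hb' := pv_digit_mem b hb
  fin_cases ha' <;> fin_cases hb' <;> decide

theorem pv_loop_eq (as bs : List Char)
    (h : ∀ i : Nat, i < min as.length bs.length → as.take i = bs.take i →
      as.getD i ' ' ≠ bs.getD i ' ' → ((as.getD i ' ').isDigit ∧ (bs.getD i ' ').isDigit)) :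
    pvLoopA as bs =
      (let n := min as.length bs.length
       if as.take n = bs.take n then 0 else if pvLexGT (as.take n) (bs.take n) then 1 else -1) := by
  induction as generalizing bs with
  | nil => cases bs <;> simp [pvLoopA]
  | cons a as ih =>
    cases bs with
    | nil => simp [pvLoopA]
    | cons b bs =>
      simp only [List.length_cons, Nat.succ_min_succ, List.take_succ_cons, List.cons.injEq]
      by_cases hab : a = b
      · subst hab
        have hx : pvLoopA (a :: as) (a :: bs) = pvLoopA as bs := by simp [pvLoopA]
        have hh : ∀ i : Nat, i < min as.length bs.length → as.take i = bs.take i →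
            as.getD i ' ' ≠ bs.getD i ' ' →
            ((as.getD i ' ').isDigit ∧ (bs.getD i ' ').isDigit) := by
          intro i hi ht hd
          have := h (i + 1) (by simpa using Nat.succ_lt_succ hi)
            (by simpa [List.take_succ_cons] using ht)
            (by simpa [List.getD_cons_succ] using hd)
          simpa [List.getD_cons_succ] using this
        rw [hx, ih bs hh]
        simp [pvLexGT]
      · obtain ⟨da, db⟩ := h 0 (by simp) rfl (by simpa [List.getD_cons_zero] using hab)
        simp only [List.getD_cons_zero] at da db
        simp only [pvLoopA, if_neg hab, pvLexGT]
        by_cases hlt : b < a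
        · rw [if_pos ((pv_digit_cmp a b da db).mpr hlt)]
          simp [hab, hlt]
        · rw [if_neg (fun hx => hlt ((pv_digit_cmp a b da db).mp hx))]
          simp [hab, hlt]

-- ===== VERDICT (by name: the statement is the Claim_ definition above) =====
theorem pv_digit_code (c : Char) : (47 < c.toNat ∧ c.toNat < 58) ↔ c.isDigit = true := by
  simp only [Char.isDigit, Bool.and_eq_true, decide_eq_true_eq, ge_iff_le,
    UInt32.le_iff_toNat_le]
  have h0 : ('0').val.toNat = 48 := rfl
  have h9 : ('9').val.toNat = 57 := rfl
  have : c.val.toNat = c.toNat := rfl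
  omega

theorem pv_pre_getD (s1 s2 : String) (hpre : Pre_custom_sorting_algo s1 s2) :
    ∀ i : Nat, i < min s1.toList.length s2.toList.length →
      s1.toList.take i = s2.toList.take i →
      s1.toList.getD i ' ' ≠ s2.toList.getD i ' ' →
      ((s1.toList.getD i ' ').isDigit ∧ (s2.toList.getD i ' ').isDigit) := by
  intro i hi ht hd
  have ha : i < s1.toList.length := lt_of_lt_of_le hi (min_le_left _ _)
  have hb : i < s2.toList.length := lt_of_lt_of_le hi (min_le_right _ _)
  simp only [List.getD_eq_getElem _ _ ha, List.getD_eq_getElem _ _ hb] at hd ⊢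
  have := hpre i hi ht (by simpa [List.get_eq_getElem] using hd)
  simp only [List.get_eq_getElem] at this
  exact ⟨(pv_digit_code _).mp this.1, (pv_digit_code _).mp this.2⟩

theorem custom_sorting_algo_spec : Claim_equal_custom_sorting_algo := by
  intro s1 s2 _ hpre
  unfold Spec_custom_sorting_algo custom_sorting_algo custom_sorting_algo_alt
  by_cases heq : s1 = s2
  · simp [heq]
  · rw [if_neg heq]
    exact pv_loop_eq s1.toList s2.toList (pv_pre_getD s1 s2 hpre)

theorem custom_sorting_algo_raises : Claim_raises_custom_sorting_algo := by
  unfold Claim_raises_custom_sorting_algo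
  refine ⟨?_, by decide⟩
  rintro s1 s2 _ ⟨i, hi, ht, hd, hnd⟩ hpre
  exact hnd (hpre i hi ht hd)

-- self-check: the literal pvRaiseWitnessOut_ value is read off the proved raises claim
theorem pvRaiseWitnessOut_ok :
    custom_sorting_algo_alt (pvRaiseWitness_custom_sorting_algo.1)
      (pvRaiseWitness_custom_sorting_algo.2) = pvRaiseWitnessOut_custom_sorting_algo :=
  custom_sorting_algo_raises.2.2.2
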